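-- pv_equiv track=rewrite | github.com/kumbarsumant/dsa-notes | queue/02_min_max_sum_in_window.py | solve
-- ===== SOURCE A (Python) =====
-- from collections import deque
--
-- def solve(nums, k):
--     n = len(nums)
--     min_q = deque()
--     max_q = deque()
--
--     # 1. Process the Initial Window
--     for i in range(k):
--         val = nums[i]
--         while min_q and val < min_q[-1]:
--             min_q.pop()
--         min_q.append(val)
--
--         while max_q and val > max_q[-1]:
--             max_q.pop()
--         max_q.append(val)
--
--     left = 0
--     right = k - 1
--     total_result = 0
--
--     # 2. Slide the window through the rest of the array
--     while right < n:
--         # Add min and max of current window to result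
--         total_result += min_q[0] + max_q[0]
--
--         out_val = nums[left]
--         left += 1
--         right += 1
--
--         if right >= n:
--             break
--
--         in_val = nums[right]
--
--         # Remove the exiting element if it was the current min or max
--         if min_q and min_q[0] == out_val:
--             min_q.popleft()
--         if max_q and max_q[0] == out_val:
--             max_q.popleft()
--
--         while min_q and in_val < min_q[-1]:
--             min_q.pop()
--         min_q.append(in_val)
--
--         while max_q and in_val > max_q[-1]:
--             max_q.pop()
--         max_q.append(in_val)
--
--     return total_result
-- ===== SOURCE B (Python) =====
-- def solve(nums, k):
--     n = len(nums)
--     w = [nums[i] for i in range(k)]  # first window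
--     total = 0
--     for right in range(k - 1, n):
--         if right > k - 1:
--             w.pop(0)
--             w.append(nums[right])
--         total += min(w) + max(w)
--     return total
-- ===== Notes on version B (the rewrite author's own statement) =====
-- stated objective: simpler
-- what changed: Replaces A's two monotonic deques with lazy front-eviction by a plain sliding window list: build the first window, then pop/append one element per slide and rescan it with builtin min and max.
import Mathlib
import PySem

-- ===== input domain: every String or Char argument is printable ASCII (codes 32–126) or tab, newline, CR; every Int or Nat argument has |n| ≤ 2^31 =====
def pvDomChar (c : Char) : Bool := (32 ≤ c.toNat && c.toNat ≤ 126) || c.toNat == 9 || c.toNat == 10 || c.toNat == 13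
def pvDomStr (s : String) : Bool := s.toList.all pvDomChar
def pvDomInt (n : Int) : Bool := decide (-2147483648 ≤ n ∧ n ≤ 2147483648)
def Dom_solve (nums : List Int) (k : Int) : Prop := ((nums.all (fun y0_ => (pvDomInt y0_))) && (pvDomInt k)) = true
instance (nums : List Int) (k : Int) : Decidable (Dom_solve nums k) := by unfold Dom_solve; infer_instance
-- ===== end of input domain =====

-- B replaces A's two monotonic deques by a plain sliding window list whose min/max are rescanned per
-- window (simpler, at the cost of more work per window); neither version mutates its arguments.

-- ===== PORT A =====

-- "while q and val < q[-1]: q.pop(); q.append(val)"  — popping from the back of a deque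
-- (front = list head) is dropWhile on the reversed list; `lt v a` is the pop condition.
def pyPush (lt : Int → Int → Bool) (q : List Int) (v : Int) : List Int :=
  (q.reverse.dropWhile (fun a => lt v a)).reverse ++ [v]

-- the "while right < n" slide loop; fuel (n+1 at the call) only makes the recursion structural,
-- inside Pre_ it is never exhausted.  deque[0] on an empty deque (headD default) and nums[i]
-- out of range (pyGetD default) are Python errors, reached only outside Pre_.
def slideLoop (nums : List Int) (n : Int) : Nat → Int → Int → Int → List Int → List Int → Int
  | 0, _, _, total, _, _ => total
  | fuel+1, left, right, total, mq, xq =>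
    if right < n then
      let total' := total + (mq.headD 0 + xq.headD 0)
      let out := PySem.List.pyGetD nums left 0
      let right' := right + 1
      if n ≤ right' then total'
      else
        let inv := PySem.List.pyGetD nums right' 0
        let mq' := if mq.head? = some out then mq.tail else mq
        let xq' := if xq.head? = some out then xq.tail else xq
        slideLoop nums n fuel (left + 1) right' total'
          (pyPush (fun a b => decide (a < b)) mq' inv)
          (pyPush (fun a b => decide (b < a)) xq' inv)
    else total

def solve (nums : List Int) (k : Int) : Int :=
  let n : Int := nums.length
  let qs := (PySem.List.pyRange 0 k 1).foldl
    (fun (qs : List Int × List Int) i =>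
      let val := PySem.List.pyGetD nums i 0   -- nums[i]; IndexError (outside Pre_) hits the default
      (pyPush (fun a b => decide (a < b)) qs.1 val,
       pyPush (fun a b => decide (b < a)) qs.2 val)) ([], [])
  slideLoop nums n (n + 1).toNat 0 (k - 1) 0 qs.1 qs.2

-- ===== PORT B =====
-- "w = [nums[i] for i in range(k)]" then "for right in range(k-1, n): slide w; total += min(w)+max(w)";
-- w.pop(0) on a list is tail (pop on empty raises, reached only outside Pre_), nums[i] out of range
-- (pyGetD default) is an IndexError, reached only outside Pre_.
def solve_alt (nums : List Int) (k : Int) : Int :=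
  let n : Int := nums.length
  let w0 := (PySem.List.pyRange 0 k 1).map (fun i => PySem.List.pyGetD nums i 0)
  ((PySem.List.pyRange (k - 1) n 1).foldl
    (fun (st : List Int × Int) right =>
      let w := if k - 1 < right
        then st.1.tail ++ [PySem.List.pyGetD nums right 0]
        else st.1
      (w, st.2 + ((PySem.List.min? w (fun y => y)).getD 0 + (PySem.List.max? w (fun y => y)).getD 0)))
    (w0, 0)).2

-- ===== PRECONDITION & SPEC =====
-- Pre_ excludes exactly the inputs on which the Python A raises: k > len(nums) or k ≤ 0
-- (IndexError reading nums[i] in the init loop, or deque[0] on an empty deque).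
def Pre_solve (nums : List Int) (k : Int) : Prop := 1 ≤ k ∧ k ≤ (nums.length : Int)
instance (nums : List Int) (k : Int) : Decidable (Pre_solve nums k) := by unfold Pre_solve; infer_instance
def pvWitness_solve : List Int × Int := ([3, 1, 2, 4], 2)

def Spec_solve (nums : List Int) (k : Int) (out : Int) : Prop := out = solve_alt nums k
instance (nums : List Int) (k : Int) (out : Int) : Decidable (Spec_solve nums k out) := by unfold Spec_solve; infer_instance

-- ===== CLAIM (what is proved, stated in full; the proofs are below) =====
def Claim_equal_solve : Prop := ∀ (nums : List Int) (k : Int), Dom_solve nums k → Pre_solve nums k → Spec_solve nums k (solve nums k)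

-- ===== LEMMAS AND PROOFS =====

-- the state of a monotonic deque after feeding it a window w:
-- keep w[i] iff no later element a of the window has `lt a w[i]` (would have popped it).
def Dq (lt : Int → Int → Bool) : List Int → List Int
  | [] => []
  | v :: t => if t.all (fun a => !lt a v) then v :: Dq lt t else Dq lt t

theorem mem_Dq {lt : Int → Int → Bool} {w : List Int} {a : Int} (h : a ∈ Dq lt w) : a ∈ w := by
  induction w with
  | nil => simpa [Dq] using h
  | cons v t ih =>
    by_cases hc : t.all (fun a => !lt a v) = true
    · rcases (by simp only [Dq, hc, if_true, List.mem_cons] at h; exact h : a = v ∨ a ∈ Dq lt t) with h' | h'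
      · simp [h']
      · exact List.mem_cons_of_mem _ (ih h')
    · exact List.mem_cons_of_mem _ (ih (by simpa [Dq, hc] using h))

theorem pyPush_all {lt : Int → Int → Bool} {q : List Int} {x : Int}
    (h : ∀ a ∈ q, lt x a = true) : pyPush lt q x = [x] := by
  have : q.reverse.dropWhile (fun a => lt x a) = [] :=
    List.dropWhile_eq_nil_iff.mpr (fun a ha => h a (List.mem_reverse.mp ha))
  simp [pyPush, this]

theorem pyPush_cons {lt : Int → Int → Bool} {d : List Int} {v x : Int}
    (h : lt x v = false) : pyPush lt (v :: d) x = v :: pyPush lt d x := by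
  unfold pyPush
  rw [List.reverse_cons, List.dropWhile_append]
  by_cases he : (d.reverse.dropWhile (fun a => lt x a)).isEmpty = true
  · simp [h, List.isEmpty_iff.mp he]
  · simp [he]

theorem Dq_append {lt : Int → Int → Bool}
    (Htrans : ∀ x v a : Int, lt x v = true → lt a v = false → lt x a = true)
    (w : List Int) (x : Int) : Dq lt (w ++ [x]) = pyPush lt (Dq lt w) x := by
  induction w with
  | nil => simp [Dq, pyPush]
  | cons v t ih =>
    by_cases hall : t.all (fun a => !lt a v) = true
    · by_cases hx : lt x v = true
      · have hdrop : ∀ a ∈ Dq lt t, lt x a = true := by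
          intro a ha
          exact Htrans x v a hx (by simpa using (List.all_eq_true.mp hall a (mem_Dq ha)))
        have hallx : (t ++ [x]).all (fun a => !lt a v) = false := by
          simp [List.all_append, hx]
        rw [show v :: t ++ [x] = v :: (t ++ [x]) from rfl]
        simp only [Dq, hallx, Bool.false_eq_true, if_false, ih, Dq, hall, if_true]
        rw [pyPush_all hdrop, pyPush_all]
        intro a ha
        rcases List.mem_cons.mp ha with rfl | ha
        · exact hx
        · exact hdrop a ha
      · have hallx : (t ++ [x]).all (fun a => !lt a v) = true := by
          simp only [List.all_append, hall, Bool.true_and, List.all_cons, List.all_nil,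
            Bool.and_true]
          simp [Bool.eq_false_iff.mpr hx]
        rw [show v :: t ++ [x] = v :: (t ++ [x]) from rfl]
        simp only [Dq, hallx, if_true, ih, Dq, hall]
        rw [pyPush_cons (Bool.eq_false_iff.mpr hx)]
    · have hallx : (t ++ [x]).all (fun a => !lt a v) = false := by
        rcases List.all_eq_false.mp (Bool.eq_false_iff.mpr hall) with ⟨a, ha, hfa⟩
        exact List.all_eq_false.mpr ⟨a, List.mem_append_left _ ha, hfa⟩
      rw [show v :: t ++ [x] = v :: (t ++ [x]) from rfl]
      simp only [Dq, hallx, Bool.false_eq_true, if_false, ih, Dq, hall]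

theorem foldl_pyPush {lt : Int → Int → Bool}
    (Htrans : ∀ x v a : Int, lt x v = true → lt a v = false → lt x a = true)
    (w : List Int) : w.foldl (pyPush lt) [] = Dq lt w := by
  induction w using List.reverseRecOn with
  | nil => simp [Dq]
  | append_singleton w x ih =>
    rw [List.foldl_append, List.foldl_cons, List.foldl_nil, ih, Dq_append Htrans]

theorem ltMin_trans : ∀ x v a : Int, decide (x < v) = true → decide (a < v) = false → decide (x < a) = true := by
  intro x v a h1 h2; simp at *; omega

theorem ltMax_trans : ∀ x v a : Int, decide (v < x) = true → decide (v < a) = false → decide (a < x) = true := by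
  intro x v a h1 h2; simp at *; omega

theorem foldl_min_acc (s : List Int) : ∀ v u : Int, s.foldl min (min v u) = min v (s.foldl min u) := by
  induction s with
  | nil => intro v u; simp
  | cons a s ih =>
    intro v u
    simp only [List.foldl_cons]
    rw [min_assoc, ih]

theorem foldl_max_acc (s : List Int) : ∀ v u : Int, s.foldl max (max v u) = max v (s.foldl max u) := by
  induction s with
  | nil => intro v u; simp
  | cons a s ih =>
    intro v u
    simp only [List.foldl_cons]
    rw [max_assoc, ih]

theorem foldl_min_self (t : List Int) : ∀ v : Int, (∀ a ∈ t, v ≤ a) → t.foldl min v = v := by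
  induction t with
  | nil => intro v _; rfl
  | cons a s ih =>
    intro v h
    simp only [List.foldl_cons, min_eq_left (h a (by simp))]
    exact ih v (fun b hb => h b (by simp [hb]))

theorem foldl_max_self (t : List Int) : ∀ v : Int, (∀ a ∈ t, a ≤ v) → t.foldl max v = v := by
  induction t with
  | nil => intro v _; rfl
  | cons a s ih =>
    intro v h
    simp only [List.foldl_cons, max_eq_left (h a (by simp))]
    exact ih v (fun b hb => h b (by simp [hb]))

theorem Dq_head_min (t : List Int) : ∀ v : Int, (Dq (fun a b => decide (a < b)) (v :: t)).head? = some (t.foldl min v) := by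
  induction t with
  | nil => intro v; simp [Dq]
  | cons u s ih =>
    intro v
    by_cases hall : (u :: s).all (fun a => !decide (a < v)) = true
    · have hge : ∀ a ∈ u :: s, v ≤ a := by
        intro a ha; have := List.all_eq_true.mp hall a ha; simp at this; omega
      simp only [Dq, hall, if_true, List.head?_cons, foldl_min_self _ v hge]
    · rcases List.all_eq_false.mp (Bool.eq_false_iff.mpr hall) with ⟨a, ha, hfa⟩
      have hav : a < v := by simpa using hfa
      have hfold : s.foldl min u ≤ a := by
        rcases List.mem_cons.mp ha with rfl | ha'
        · exact (PySem.List.foldl_min_le s a).1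
        · exact (PySem.List.foldl_min_le s u).2 a ha'
      have : (u :: s).foldl min v = s.foldl min u := by
        rw [List.foldl_cons, show min v u = min v u from rfl, foldl_min_acc,
          min_eq_right (le_of_lt (lt_of_le_of_lt hfold hav))]
      rw [this]
      simp only [Dq, hall, Bool.false_eq_true, if_false]
      exact ih u

theorem Dq_head_max (t : List Int) : ∀ v : Int, (Dq (fun a b => decide (b < a)) (v :: t)).head? = some (t.foldl max v) := by
  induction t with
  | nil => intro v; simp [Dq]
  | cons u s ih =>
    intro v
    by_cases hall : (u :: s).all (fun a => !decide (v < a)) = true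
    · have hge : ∀ a ∈ u :: s, a ≤ v := by
        intro a ha; have := List.all_eq_true.mp hall a ha; simp at this; omega
      simp only [Dq, hall, if_true, List.head?_cons, foldl_max_self _ v hge]
    · rcases List.all_eq_false.mp (Bool.eq_false_iff.mpr hall) with ⟨a, ha, hfa⟩
      have hav : v < a := by simpa using hfa
      have hfold : a ≤ s.foldl max u := by
        rcases List.mem_cons.mp ha with rfl | ha'
        · exact (PySem.List.le_foldl_max s a).1
        · exact (PySem.List.le_foldl_max s u).2 a ha'
      have : (u :: s).foldl max v = s.foldl max u := by
        rw [List.foldl_cons, foldl_max_acc,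
          max_eq_right (le_of_lt (lt_of_lt_of_le hav hfold))]
      rw [this]
      simp only [Dq, hall, Bool.false_eq_true, if_false]
      exact ih u

theorem Dq_popfront_min (t : List Int) (v : Int) :
    (if (Dq (fun a b => decide (a < b)) (v :: t)).head? = some v
     then (Dq (fun a b => decide (a < b)) (v :: t)).tail
     else Dq (fun a b => decide (a < b)) (v :: t)) = Dq (fun a b => decide (a < b)) t := by
  by_cases hall : t.all (fun a => !decide (a < v)) = true
  · simp [Dq, hall]
  · rcases List.all_eq_false.mp (Bool.eq_false_iff.mpr hall) with ⟨a, ha, hfa⟩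
    have hav : a < v := by simpa using hfa
    match t, ha with
    | u :: s, ha =>
      have hh := Dq_head_min s u
      have hne : (Dq (fun a b => decide (a < b)) (u :: s)).head? ≠ some v := by
        rw [hh]
        have hfold : s.foldl min u ≤ a := by
          rcases List.mem_cons.mp ha with rfl | ha'
          · exact (PySem.List.foldl_min_le s a).1
          · exact (PySem.List.foldl_min_le s u).2 a ha'
        intro hc
        have : s.foldl min u = v := by simpa using hc
        omega
      have hD : Dq (fun a b => decide (a < b)) (v :: u :: s) = Dq (fun a b => decide (a < b)) (u :: s) := by
        rw [show Dq (fun a b => decide (a < b)) (v :: u :: s)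
            = if (u :: s).all (fun a => !decide (a < v)) then v :: Dq (fun a b => decide (a < b)) (u :: s)
              else Dq (fun a b => decide (a < b)) (u :: s) from rfl, if_neg hall]
      rw [hD, if_neg hne]

theorem Dq_popfront_max (t : List Int) (v : Int) :
    (if (Dq (fun a b => decide (b < a)) (v :: t)).head? = some v
     then (Dq (fun a b => decide (b < a)) (v :: t)).tail
     else Dq (fun a b => decide (b < a)) (v :: t)) = Dq (fun a b => decide (b < a)) t := by
  by_cases hall : t.all (fun a => !decide (v < a)) = true
  · simp [Dq, hall]
  · rcases List.all_eq_false.mp (Bool.eq_false_iff.mpr hall) with ⟨a, ha, hfa⟩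
    have hav : v < a := by simpa using hfa
    match t, ha with
    | u :: s, ha =>
      have hh := Dq_head_max s u
      have hne : (Dq (fun a b => decide (b < a)) (u :: s)).head? ≠ some v := by
        rw [hh]
        have hfold : a ≤ s.foldl max u := by
          rcases List.mem_cons.mp ha with rfl | ha'
          · exact (PySem.List.le_foldl_max s a).1
          · exact (PySem.List.le_foldl_max s u).2 a ha'
        intro hc
        have : s.foldl max u = v := by simpa using hc
        omega
      have hD : Dq (fun a b => decide (b < a)) (v :: u :: s) = Dq (fun a b => decide (b < a)) (u :: s) := by
        rw [show Dq (fun a b => decide (b < a)) (v :: u :: s)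
            = if (u :: s).all (fun a => !decide (v < a)) then v :: Dq (fun a b => decide (b < a)) (u :: s)
              else Dq (fun a b => decide (b < a)) (u :: s) from rfl, if_neg hall]
      rw [hD, if_neg hne]

-- min+max of one window, as A's deque heads and B's min/max both compute it
def wext : List Int → Int
  | [] => 0
  | v :: t => t.foldl min v + t.foldl max v

theorem foldl_pyRange_take {β : Type} (L : List Int) (f : β → Int → β) :
    ∀ (K : Nat) (init : β), K ≤ L.length →
    (PySem.List.pyRange 0 (K : Int) 1).foldl (fun acc i => f acc (PySem.List.pyGetD L i 0)) init
      = (L.take K).foldl f init := by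
  intro K
  induction K with
  | zero => intro init _; simp [PySem.List.pyRange_one_eq_nil]
  | succ K ih =>
    intro init hK
    have hKlt : K < L.length := by omega
    rw [show ((K + 1 : Nat) : Int) = (K : Int) + 1 by push_cast; ring,
      PySem.List.pyRange_one_succ_right (by positivity), List.foldl_append,
      ih init (by omega), List.take_add_one]
    simp only [List.foldl_cons, List.foldl_nil]
    rw [List.getElem?_eq_getElem hKlt]
    simp only [Option.toList_some, List.foldl_append, List.foldl_cons, List.foldl_nil]
    rw [PySem.List.pyGetD_natCast, List.getD_eq_getElem?_getD, List.getElem?_eq_getElem hKlt]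
    rfl

theorem headD_of_head? {l : List Int} {x : Int} (h : l.head? = some x) : l.headD 0 = x := by
  cases l <;> simp_all

theorem drop_range_cons {m j : Nat} (h : j < m) :
    (List.range m).drop j = j :: (List.range m).drop (j + 1) := by
  have h1 : (List.range m).drop j = List.range' j (m - j) := by
    rw [List.range_eq_range', List.drop_range']; simp
  have h2 : (List.range m).drop (j + 1) = List.range' (j + 1) (m - (j + 1)) := by
    rw [List.range_eq_range', List.drop_range']; simp
  rw [h1, h2, show m - j = (m - (j + 1)) + 1 by omega, List.range'_succ]

theorem slide_inv (L : List Int) (K : Nat) (hK : 1 ≤ K) :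
    ∀ (f j : Nat) (total : Int), j + K ≤ L.length → L.length - K - j < f →
    slideLoop L (L.length : Int) f (j : Int) ((j : Int) + (K : Int) - 1) total
        (Dq (fun a b => decide (a < b)) ((L.drop j).take K))
        (Dq (fun a b => decide (b < a)) ((L.drop j).take K))
      = total + (((List.range (L.length - K + 1)).drop j).map
          (fun i => wext ((L.drop i).take K))).sum := by
  intro f
  induction f with
  | zero => intro j total _ hf; omega
  | succ f ih =>
    intro j total hjK hf
    have hjlt : j < L.length := by omega
    have hWj : (L.drop j).take K = L[j] :: (L.drop (j + 1)).take (K - 1) := by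
      rw [List.drop_eq_getElem_cons hjlt, show K = (K - 1) + 1 by omega, List.take_succ_cons]
      simp
    simp only [slideLoop]
    rw [if_pos (show ((j : Int) + (K : Int) - 1 : Int) < (L.length : Int) by omega)]
    have hout : PySem.List.pyGetD L (j : Int) 0 = L[j] := by
      rw [PySem.List.pyGetD_natCast, List.getD_eq_getElem?_getD, List.getElem?_eq_getElem hjlt]
      rfl
    have hheadmin := headD_of_head? (hWj ▸ Dq_head_min ((L.drop (j + 1)).take (K - 1)) L[j])
    have hheadmax := headD_of_head? (hWj ▸ Dq_head_max ((L.drop (j + 1)).take (K - 1)) L[j])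
    rw [hheadmin, hheadmax, hout]
    have hwext : wext ((L.drop j).take K)
        = ((L.drop (j + 1)).take (K - 1)).foldl min L[j] + ((L.drop (j + 1)).take (K - 1)).foldl max L[j] := by
      rw [hWj]; rfl
    by_cases hend : j + K = L.length
    · rw [if_pos (show (L.length : Int) ≤ (j : Int) + (K : Int) - 1 + 1 by omega)]
      have hdrop : (List.range (L.length - K + 1)).drop j = [j] := by
        rw [drop_range_cons (by omega)]
        rw [List.drop_eq_nil_of_le (by simp; omega)]
      rw [hdrop]
      simp [hwext]
    · have hlt : j + K < L.length := by omega
      rw [if_neg (show ¬ ((L.length : Int) ≤ (j : Int) + (K : Int) - 1 + 1) by omega)]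
      have hin : PySem.List.pyGetD L ((j : Int) + (K : Int) - 1 + 1) 0 = L[j + K] := by
        rw [show ((j : Int) + (K : Int) - 1 + 1 : Int) = ((j + K : Nat) : Int) by push_cast; ring,
          PySem.List.pyGetD_natCast, List.getD_eq_getElem?_getD, List.getElem?_eq_getElem hlt]
        rfl
      rw [hin, hWj, Dq_popfront_min, Dq_popfront_max]
      have hWj1 : (L.drop (j + 1)).take K = (L.drop (j + 1)).take (K - 1) ++ [L[j + K]] := by
        have hstep : (L.drop (j + 1)).take ((K - 1) + 1) = (L.drop (j + 1)).take (K - 1) ++ [L[j + K]] := by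
          rw [List.take_add_one, List.getElem?_drop, show (j + 1) + (K - 1) = j + K by omega,
            List.getElem?_eq_getElem hlt]
          simp
        conv_lhs => rw [show K = (K - 1) + 1 by omega]
        exact hstep
      rw [← Dq_append ltMin_trans, ← Dq_append ltMax_trans, ← hWj1]
      have harg1 : ((j : Int) + 1 : Int) = ((j + 1 : Nat) : Int) := by push_cast; ring
      have harg2 : ((j : Int) + (K : Int) - 1 + 1 : Int) = ((j + 1 : Nat) : Int) + (K : Int) - 1 := by push_cast; ring
      rw [harg1, harg2, ih (j + 1) _ (by omega) (by omega)]
      rw [drop_range_cons (show j < L.length - K + 1 by omega)]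
      simp only [List.map_cons, List.sum_cons, hwext]
      ring

theorem wext_min_max (w : List Int) (hw : w ≠ []) :
    (PySem.List.min? w (fun y => y)).getD 0 + (PySem.List.max? w (fun y => y)).getD 0 = wext w := by
  match w with
  | v :: t =>
    rw [PySem.List.min?_id_cons, PySem.List.max?_id_cons]
    rfl

theorem window_ne_nil (L : List Int) (K i : Nat) (hK : 1 ≤ K) (hi : i + K ≤ L.length) :
    (L.drop i).take K ≠ [] := by
  have : ((L.drop i).take K).length = min K (L.length - i) := by
    simp [List.length_take]
  intro hc
  rw [hc] at this
  simp at this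
  omega

theorem map_pyRange_take (L : List Int) :
    ∀ (K : Nat), K ≤ L.length →
    (PySem.List.pyRange 0 (K : Int) 1).map (fun i => PySem.List.pyGetD L i 0) = L.take K := by
  intro K
  induction K with
  | zero => intro _; simp [PySem.List.pyRange_one_eq_nil]
  | succ K ih =>
    intro hK
    have hKlt : K < L.length := by omega
    rw [show ((K + 1 : Nat) : Int) = (K : Int) + 1 by push_cast; ring,
      PySem.List.pyRange_one_succ_right (by positivity), List.map_append,
      ih (by omega), List.take_add_one]
    rw [List.getElem?_eq_getElem hKlt]
    simp only [List.map_cons, List.map_nil, Option.toList_some]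
    rw [PySem.List.pyGetD_natCast, List.getD_eq_getElem?_getD, List.getElem?_eq_getElem hKlt]
    rfl

theorem window_slide (L : List Int) (K j : Nat) (hK : 1 ≤ K) (hj : 1 ≤ j)
    (hjK : j + K ≤ L.length) :
    ((L.drop (j - 1)).take K).tail ++ [L[j + K - 1]'(by omega)] = (L.drop j).take K := by
  have hj1 : j - 1 < L.length := by omega
  have hWj : (L.drop (j - 1)).take K = L[j - 1] :: (L.drop j).take (K - 1) := by
    rw [List.drop_eq_getElem_cons hj1, show K = (K - 1) + 1 by omega, List.take_succ_cons,
      show j - 1 + 1 = j by omega]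
    simp
  rw [hWj, List.tail_cons]
  have hlt : j + K - 1 < L.length := by omega
  have hstep : (L.drop j).take ((K - 1) + 1)
      = (L.drop j).take (K - 1) ++ [L[j + K - 1]'(by omega)] := by
    rw [List.take_add_one, List.getElem?_drop, show j + (K - 1) = j + K - 1 by omega,
      List.getElem?_eq_getElem hlt]
    simp
  conv_rhs => rw [show K = (K - 1) + 1 by omega]
  rw [hstep]

theorem alt_loop (L : List Int) (K : Nat) (hK : 1 ≤ K) :
    ∀ (c j : Nat) (total : Int), 1 ≤ j → j + K ≤ L.length + 1 → L.length + 1 - (j + K) ≤ c →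
    ((PySem.List.pyRange ((j + K - 1 : Nat) : Int) (L.length : Int) 1).foldl
      (fun (st : List Int × Int) right =>
        let w := if (K : Int) - 1 < right
          then st.1.tail ++ [PySem.List.pyGetD L right 0]
          else st.1
        (w, st.2 + ((PySem.List.min? w (fun y => y)).getD 0 + (PySem.List.max? w (fun y => y)).getD 0)))
      ((L.drop (j - 1)).take K, total)).2
    = total + (((List.range (L.length - K + 1)).drop j).map
        (fun i => wext ((L.drop i).take K))).sum := by
  intro c
  induction c with
  | zero =>
    intro j total hj hjK hc
    have hend : j + K = L.length + 1 := by omega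
    have hdrop : (List.range (L.length - K + 1)).drop j = [] :=
      List.drop_eq_nil_of_le (by simp; omega)
    rw [PySem.List.pyRange_one_eq_nil (by push_cast; omega), List.foldl_nil, hdrop]
    simp
  | succ c ih =>
    intro j total hj hjK hc
    by_cases hend : j + K = L.length + 1
    · have hdrop : (List.range (L.length - K + 1)).drop j = [] :=
        List.drop_eq_nil_of_le (by simp; omega)
      rw [PySem.List.pyRange_one_eq_nil (by push_cast; omega), List.foldl_nil, hdrop]
      simp
    · have hlt : j + K ≤ L.length := by omega
      have hidx : j + K - 1 < L.length := by omega
      rw [PySem.List.pyRange_one_cons (by push_cast; omega), List.foldl_cons]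
      have hcond : ((K : Int) - 1 < ((j + K - 1 : Nat) : Int)) := by push_cast; omega
      have hget : PySem.List.pyGetD L ((j + K - 1 : Nat) : Int) 0 = L[j + K - 1] := by
        rw [PySem.List.pyGetD_natCast, List.getD_eq_getElem?_getD, List.getElem?_eq_getElem hidx]
        rfl
      simp only [if_pos hcond, hget, window_slide L K j hK hj hlt]
      rw [wext_min_max _ (window_ne_nil L K j hK hlt)]
      have harg : ((j + K - 1 : Nat) : Int) + 1 = (((j + 1) + K - 1 : Nat) : Int) := by
        push_cast; omega
      rw [harg, drop_range_cons (show j < L.length - K + 1 by omega)]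
      simp only [List.map_cons, List.sum_cons]
      have IH := ih (j + 1) (total + wext ((L.drop j).take K)) (by omega) (by omega) (by omega)
      simp only [show j + 1 - 1 = j from rfl] at IH
      exact IH.trans (by ring)

theorem solve_alt_eq (L : List Int) (K : Nat) (hK1 : 1 ≤ K) (hK2 : K ≤ L.length) :
    solve_alt L (K : Int)
      = ((List.range (L.length - K + 1)).map (fun i => wext ((L.drop i).take K))).sum := by
  unfold solve_alt
  simp only
  rw [map_pyRange_take L K hK2]
  rw [PySem.List.pyRange_one_cons (by push_cast; omega), List.foldl_cons]
  have hcond : ¬ ((K : Int) - 1 < (K : Int) - 1) := by omega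
  simp only [if_neg hcond]
  have h0ne : L.take K ≠ [] := by
    have := window_ne_nil L K 0 hK1 (by omega)
    simpa using this
  rw [wext_min_max (L.take K) h0ne]
  rw [show ((K : Int) - 1) + 1 = ((1 + K - 1 : Nat) : Int) by push_cast; omega]
  have ALT := alt_loop L K hK1 (L.length + 1 - (1 + K)) 1 (0 + wext (L.take K))
    (by omega) (by omega) (by omega)
  simp only [show (1 : Nat) - 1 = 0 from rfl, List.drop_zero] at ALT
  have hr := drop_range_cons (show 0 < L.length - K + 1 by omega)
  simp only [List.drop_zero] at hr
  rw [hr]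
  simp only [List.map_cons, List.sum_cons, List.drop_zero]
  exact ALT.trans (by ring)

-- ===== VERDICT (by name: the statement is the Claim_ definition above) =====
theorem solve_spec : Claim_equal_solve := by
  intro nums k _ hPre
  obtain ⟨h1, h2⟩ := hPre
  have hk : k = (k.toNat : Int) := by omega
  have hK1 : 1 ≤ k.toNat := by omega
  have hK2 : k.toNat ≤ nums.length := by omega
  unfold Spec_solve
  rw [hk, solve_alt_eq nums k.toNat hK1 hK2]
  have hF := foldl_pyRange_take nums
    (fun (qs : List Int × List Int) v =>
      (pyPush (fun a b => decide (a < b)) qs.1 v, pyPush (fun a b => decide (b < a)) qs.2 v))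
    k.toNat ([], []) hK2
  rw [PySem.List.foldl_prod_mk (pyPush (fun a b => decide (a < b)))
    (pyPush (fun a b => decide (b < a))) (nums.take k.toNat) [] [],
    foldl_pyPush ltMin_trans, foldl_pyPush ltMax_trans] at hF
  have hslide := slide_inv nums k.toNat hK1 (nums.length + 1) 0 0 (by omega) (by omega)
  simp only [Nat.cast_zero, zero_add, List.drop_zero, zero_add] at hslide
  show slideLoop nums (nums.length : Int) (((nums.length : Int) + 1)).toNat 0 ((k.toNat : Int) - 1) 0
      ((PySem.List.pyRange 0 (k.toNat : Int) 1).foldl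
        (fun (qs : List Int × List Int) i =>
          (pyPush (fun a b => decide (a < b)) qs.1 (PySem.List.pyGetD nums i 0),
           pyPush (fun a b => decide (b < a)) qs.2 (PySem.List.pyGetD nums i 0))) ([], [])).1
      ((PySem.List.pyRange 0 (k.toNat : Int) 1).foldl
        (fun (qs : List Int × List Int) i =>
          (pyPush (fun a b => decide (a < b)) qs.1 (PySem.List.pyGetD nums i 0),
           pyPush (fun a b => decide (b < a)) qs.2 (PySem.List.pyGetD nums i 0))) ([], [])).2
    = ((List.range (nums.length - k.toNat + 1)).map
        (fun i => wext ((nums.drop i).take k.toNat))).sum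
  rw [hF, show (((nums.length : Int) + 1)).toNat = nums.length + 1 by omega, hslide]
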